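-- pv_equiv track=rewrite | github.com/juandarr/ProjectEuler | 146.py | n_generator
-- ===== SOURCE A (Python) =====
-- def n_generator(start, limit_n):
--     i = start
--     yield i
--     while i<limit_n:
--         i+=10
--         if i%3==0 or i%7 in [0,1,2,5,6] or i%13==0:
--             continue
--         yield i
-- ===== SOURCE B (Python) =====
-- def _passes(v):
--     return v % 3 != 0 and v % 7 in (3, 4) and v % 13 != 0
--
-- def n_generator(start, limit_n):
--     yield start
--     steps = -((start - limit_n) // 10)  # ceil((limit_n - start) / 10); <= 0 when start >= limit_n
--     if steps <= 0:
--         return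
--     # 10*j mod 2730 (= 2*3*5*7*13*... lcm cover of 3,7,13) repeats with period 273 in j,
--     # so which offsets survive the filter depends only on j mod 273: precompute them once.
--     ok = [j for j in range(273) if _passes(start + 10 * j)]
--     c = 0
--     while 273 * c <= steps:
--         for j in ok:
--             J = 273 * c + j
--             if 1 <= J <= steps:
--                 yield start + 10 * J
--         c += 1
-- ===== Notes on version B (the rewrite author's own statement) =====
-- stated objective: faster
-- what changed: A tests every 10-step candidate against the mod-3/7/13 filter inside the loop; B precomputes once which of the 273 step-offsets per period 2730 survive the filter and then emits only surviving values cycle by cycle, skipping filtered candidates entirely.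
import Mathlib
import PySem

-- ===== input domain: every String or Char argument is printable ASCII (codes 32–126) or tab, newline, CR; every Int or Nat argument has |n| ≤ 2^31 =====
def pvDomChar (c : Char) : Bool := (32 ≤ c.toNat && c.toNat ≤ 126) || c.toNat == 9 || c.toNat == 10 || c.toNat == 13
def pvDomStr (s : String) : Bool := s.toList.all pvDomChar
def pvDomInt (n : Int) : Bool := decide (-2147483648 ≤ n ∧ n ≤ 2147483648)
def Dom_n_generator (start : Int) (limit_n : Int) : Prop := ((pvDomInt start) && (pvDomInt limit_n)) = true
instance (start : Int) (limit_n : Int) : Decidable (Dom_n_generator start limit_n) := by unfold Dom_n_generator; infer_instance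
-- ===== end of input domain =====

-- B replaces A's candidate-by-candidate while loop by a period-2730 sieve: it precomputes once
-- which step offsets j in 0..272 survive the mod-3/7/13 filter and then emits only survivors,
-- cycle by cycle (objective: faster by a constant factor — fewer loop iterations).

-- ===== PORT A =====
-- while i < limit_n: i += 10; if i%3==0 or i%7 in [0,1,2,5,6] or i%13==0: continue; yield i
-- (fuel is a totality device only: (limit_n - i).toNat bounds the number of iterations, each adds 10)
def nGenLoopA (fuel : Nat) (limit_n : Int) (i : Int) : List Int :=
  match fuel with
  | 0 => []
  | fuel + 1 =>
    if i < limit_n then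
      (if PySem.Int.mod (i + 10) 3 = 0 ∨ PySem.Int.mod (i + 10) 7 ∈ [(0:Int),1,2,5,6] ∨
          PySem.Int.mod (i + 10) 13 = 0 then [] else [i + 10])
        ++ nGenLoopA fuel limit_n (i + 10)
    else []

def n_generator (start : Int) (limit_n : Int) : List Int :=
  start :: nGenLoopA (limit_n - start).toNat limit_n start

-- ===== PORT B =====
def pvPasses (v : Int) : Bool :=
  PySem.Int.mod v 3 != 0 && [(3:Int), 4].contains (PySem.Int.mod v 7) && PySem.Int.mod v 13 != 0

-- while 273*c <= steps: for j in ok: J = 273*c + j; if 1 <= J <= steps: yield start + 10*J; c += 1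
-- (fuel is a totality device only: steps.toNat / 273 + 1 bounds the number of cycles)
def nGenLoopB (fuel : Nat) (start steps : Int) (ok : List Int) (c : Int) : List Int :=
  match fuel with
  | 0 => []
  | fuel + 1 =>
    if 273 * c ≤ steps then
      (ok.flatMap (fun j =>
        if 1 ≤ 273 * c + j ∧ 273 * c + j ≤ steps then [start + 10 * (273 * c + j)] else []))
        ++ nGenLoopB fuel start steps ok (c + 1)
    else []

def n_generator_alt (start : Int) (limit_n : Int) : List Int :=
  let steps := -(PySem.Int.floordiv (start - limit_n) 10)
  if steps ≤ 0 then [start]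
  else
    let ok := (PySem.List.pyRange 0 273 1).filter (fun j => pvPasses (start + 10 * j))
    start :: nGenLoopB (steps.toNat / 273 + 1) start steps ok 0

-- ===== PRECONDITION & SPEC =====
def Spec_n_generator (start : Int) (limit_n : Int) (out : List Int) : Prop := out = n_generator_alt start limit_n
instance (start : Int) (limit_n : Int) (out : List Int) : Decidable (Spec_n_generator start limit_n out) := by unfold Spec_n_generator; infer_instance

-- ===== CLAIM (what is proved, stated in full; the proofs are below) =====
def Claim_equal_n_generator : Prop := ∀ (start : Int) (limit_n : Int), Dom_n_generator start limit_n → Spec_n_generator start limit_n (n_generator start limit_n)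

-- ===== LEMMAS AND PROOFS =====

-- canonical form: the guarded candidate for step J, and the run over J = 1..steps
def pvGuard (start J : Int) : List Int :=
  if pvPasses (start + 10 * J) then [start + 10 * J] else []

def pvCanon (start steps : Int) : List Int :=
  (PySem.List.pyRange 1 (steps + 1) 1).flatMap (pvGuard start)

-- A's branch equals the pvPasses guard
theorem pvGuardA_eq (v : Int) :
    (if PySem.Int.mod v 3 = 0 ∨ PySem.Int.mod v 7 ∈ [(0:Int),1,2,5,6] ∨
        PySem.Int.mod v 13 = 0 then ([] : List Int) else [v]) =
    (if pvPasses v then [v] else []) := by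
  have h3 : PySem.Int.mod v 3 = v % 3 := PySem.Int.mod_eq_emod_of_pos (by norm_num)
  have h7 : PySem.Int.mod v 7 = v % 7 := PySem.Int.mod_eq_emod_of_pos (by norm_num)
  have h13 : PySem.Int.mod v 13 = v % 13 := PySem.Int.mod_eq_emod_of_pos (by norm_num)
  simp only [pvPasses, h3, h7, h13, List.mem_cons, List.not_mem_nil, or_false,
    List.contains_cons, List.contains_nil, Bool.or_false, Bool.and_eq_true, Bool.or_eq_true,
    beq_iff_eq, bne_iff_ne, ne_eq]
  split_ifs with h1 h2 <;> first | rfl | (exfalso; omega)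

theorem pvShift {α : Type} (f : Int → List α) (a b d : Int) :
    (PySem.List.pyRange (a + d) (b + d) 1).flatMap f =
    (PySem.List.pyRange a b 1).flatMap (fun x => f (x + d)) := by
  rw [PySem.List.pyRange_one, PySem.List.pyRange_one]
  have : b + d - (a + d) = b - a := by ring
  rw [this, List.flatMap_map, List.flatMap_map]
  apply List.flatMap_congr
  intro x _
  congr 1
  ring

theorem pvFilterFlatMap {α : Type} (l : List Int) (p : Int → Bool) (f : Int → List α) :
    (l.filter p).flatMap f = l.flatMap (fun x => if p x then f x else []) := by
  induction l with
  | nil => rfl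
  | cons x xs ih =>
    by_cases h : p x <;> simp [h, ih]

-- the steps count seen from loop position i
def pvSteps (limit i : Int) : Int := -(PySem.Int.floordiv (i - limit) 10)

theorem pvSteps_nonpos_iff (limit i : Int) : pvSteps limit i ≤ 0 ↔ ¬ i < limit := by
  unfold pvSteps
  rw [show PySem.Int.floordiv (i - limit) 10 = (i - limit) / 10 from
    PySem.Int.floordiv_eq_ediv_of_pos (by norm_num)]
  omega

theorem pvSteps_succ (limit i : Int) : pvSteps limit (i + 10) = pvSteps limit i - 1 := by
  unfold pvSteps
  rw [show PySem.Int.floordiv (i + 10 - limit) 10 = (i + 10 - limit) / 10 from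
    PySem.Int.floordiv_eq_ediv_of_pos (by norm_num),
    show PySem.Int.floordiv (i - limit) 10 = (i - limit) / 10 from
    PySem.Int.floordiv_eq_ediv_of_pos (by norm_num)]
  omega

theorem pvA_eq (limit : Int) :
    ∀ (fuel : Nat) (i : Int), (pvSteps limit i).toNat ≤ fuel →
      nGenLoopA fuel limit i = pvCanon i (pvSteps limit i) := by
  intro fuel
  induction fuel with
  | zero =>
    intro i hf
    have hle : pvSteps limit i ≤ 0 := by omega
    have hlt : ¬ i < limit := (pvSteps_nonpos_iff limit i).mp hle
    unfold pvCanon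
    rw [PySem.List.pyRange_one_eq_nil (by omega), List.flatMap_nil]
    rfl
  | succ fuel ih =>
    intro i hf
    by_cases hlt : i < limit
    · have hpos : ¬ pvSteps limit i ≤ 0 := fun hle =>
        (pvSteps_nonpos_iff limit i).mp hle hlt
      simp only [nGenLoopA]
      rw [if_pos hlt]
      unfold pvCanon
      rw [PySem.List.pyRange_one_cons (by omega), List.flatMap_cons]
      congr 1
      · rw [pvGuardA_eq]; unfold pvGuard; norm_num
      · rw [ih (i + 10) (by rw [pvSteps_succ]; omega)]
        unfold pvCanon
        rw [pvSteps_succ]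
        rw [show pvSteps limit i + 1 = (pvSteps limit i - 1 + 1) + 1 from by ring,
          pvShift (pvGuard i) 1 (pvSteps limit i - 1 + 1) 1]
        apply List.flatMap_congr
        intro x _
        unfold pvGuard
        rw [show i + 10 + 10 * x = i + 10 * (x + 1) from by ring]
    · have hle : pvSteps limit i ≤ 0 := (pvSteps_nonpos_iff limit i).mpr hlt
      simp only [nGenLoopA]
      rw [if_neg hlt]
      unfold pvCanon
      rw [PySem.List.pyRange_one_eq_nil (by omega), List.flatMap_nil]

-- periodicity of the filter: adding a multiple of 2730 changes nothing
theorem pvPasses_period (x c : Int) : pvPasses (x + 2730 * c) = pvPasses x := by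
  unfold pvPasses
  have h3 : PySem.Int.mod (x + 2730 * c) 3 = (x + 2730 * c) % 3 := PySem.Int.mod_eq_emod_of_pos (by norm_num)
  have h7 : PySem.Int.mod (x + 2730 * c) 7 = (x + 2730 * c) % 7 := PySem.Int.mod_eq_emod_of_pos (by norm_num)
  have h13 : PySem.Int.mod (x + 2730 * c) 13 = (x + 2730 * c) % 13 := PySem.Int.mod_eq_emod_of_pos (by norm_num)
  have g3 : PySem.Int.mod x 3 = x % 3 := PySem.Int.mod_eq_emod_of_pos (by norm_num)
  have g7 : PySem.Int.mod x 7 = x % 7 := PySem.Int.mod_eq_emod_of_pos (by norm_num)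
  have g13 : PySem.Int.mod x 13 = x % 13 := PySem.Int.mod_eq_emod_of_pos (by norm_num)
  rw [h3, h7, h13, g3, g7, g13]
  have e3 : (x + 2730 * c) % 3 = x % 3 := by omega
  have e7 : (x + 2730 * c) % 7 = x % 7 := by omega
  have e13 : (x + 2730 * c) % 13 = x % 13 := by omega
  rw [e3, e7, e13]

-- the bounded guard used to describe B's loop
def pvH (start steps J : Int) : List Int :=
  if 1 ≤ J ∧ J ≤ steps then pvGuard start J else []

theorem pvB_cycle (start steps c : Int) :
    ((PySem.List.pyRange 0 273 1).filter (fun j => pvPasses (start + 10 * j))).flatMap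
      (fun j => if 1 ≤ 273 * c + j ∧ 273 * c + j ≤ steps then [start + 10 * (273 * c + j)] else []) =
    (PySem.List.pyRange (273 * c) (273 * c + 273) 1).flatMap (pvH start steps) := by
  rw [pvFilterFlatMap]
  have : (PySem.List.pyRange (273 * c) (273 * c + 273) 1) =
      PySem.List.pyRange (0 + 273 * c) (273 + 273 * c) 1 := by ring_nf
  rw [this, pvShift]
  apply List.flatMap_congr
  intro j _
  unfold pvH pvGuard
  have hp : pvPasses (start + 10 * (j + 273 * c)) = pvPasses (start + 10 * j) := by
    have : start + 10 * (j + 273 * c) = (start + 10 * j) + 2730 * c := by ring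
    rw [this, pvPasses_period]
  have harg : 273 * c + j = j + 273 * c := by ring
  rw [harg, hp]
  by_cases hb : 1 ≤ j + 273 * c ∧ j + 273 * c ≤ steps <;>
    by_cases hq : pvPasses (start + 10 * j) <;>
      simp [hb, hq]

theorem pvB_stop (fuel : Nat) (start steps : Int) (ok : List Int) (c : Int)
    (h : ¬ 273 * c ≤ steps) : nGenLoopB fuel start steps ok c = [] := by
  cases fuel with
  | zero => rfl
  | succ fuel => exact if_neg h

theorem pvB_eq (start steps : Int) (ok : List Int)
    (hok : ok = (PySem.List.pyRange 0 273 1).filter (fun j => pvPasses (start + 10 * j))) :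
    ∀ (fuel : Nat) (c : Int), (steps - 273 * c).toNat / 273 + 1 ≤ fuel →
      nGenLoopB fuel start steps ok c =
        (PySem.List.pyRange (273 * c) (steps + 1) 1).flatMap (pvH start steps) := by
  intro fuel
  induction fuel with
  | zero => intro c hf; exact absurd hf (by omega)
  | succ fuel ih =>
    intro c hf
    by_cases hle : 273 * c ≤ steps
    · simp only [nGenLoopB]
      rw [if_pos hle]
      by_cases hfull : 273 * (c + 1) ≤ steps
      · rw [ih (c + 1) (by omega), show (273 : Int) * (c + 1) = 273 * c + 273 from by ring,
          hok, pvB_cycle,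
          PySem.List.pyRange_one_append (273 * c) (273 * c + 273) (steps + 1)
            (by omega) (by omega), List.flatMap_append]
      · -- last cycle: the tail of the cycle range is all beyond steps, and the recursion stops
        have hstop : ¬ 273 * (c + 1) ≤ steps := by omega
        rw [pvB_stop fuel start steps ok (c + 1) hstop, List.append_nil, hok, pvB_cycle]
        rw [PySem.List.pyRange_one_append (273 * c) (steps + 1) (273 * c + 273)
          (by omega) (by omega), List.flatMap_append]
        have hnil : (PySem.List.pyRange (steps + 1) (273 * c + 273) 1).flatMap (pvH start steps) = [] := by
          rw [List.flatMap_eq_nil_iff]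
          intro J hJ
          rw [PySem.List.mem_pyRange_one] at hJ
          unfold pvH
          rw [if_neg (by omega)]
        rw [hnil, List.append_nil]
    · rw [pvB_stop _ start steps ok c hle,
        PySem.List.pyRange_one_eq_nil (by omega), List.flatMap_nil]

theorem pvH_peel (start steps : Int) (h : 0 < steps) :
    (PySem.List.pyRange 0 (steps + 1) 1).flatMap (pvH start steps) = pvCanon start steps := by
  rw [PySem.List.pyRange_one_cons (by omega), List.flatMap_cons]
  unfold pvH
  rw [if_neg (by omega), List.nil_append]
  unfold pvCanon
  apply List.flatMap_congr
  intro J hJ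
  rw [PySem.List.mem_pyRange_one] at hJ
  rw [if_pos (by omega)]

-- ===== VERDICT (by name: the statement is the Claim_ definition above) =====
theorem n_generator_spec : Claim_equal_n_generator := by
  intro start limit_n _
  unfold Spec_n_generator n_generator n_generator_alt
  have hsteps : pvSteps limit_n start = -(PySem.Int.floordiv (start - limit_n) 10) := rfl
  have hdiv : PySem.Int.floordiv (start - limit_n) 10 = (start - limit_n) / 10 :=
    PySem.Int.floordiv_eq_ediv_of_pos (by norm_num)
  rw [pvA_eq limit_n (limit_n - start).toNat start (by rw [hsteps, hdiv]; omega)]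
  by_cases h : -(PySem.Int.floordiv (start - limit_n) 10) ≤ 0
  · simp only [h, if_pos]
    have : pvCanon start (pvSteps limit_n start) = [] := by
      unfold pvCanon
      rw [PySem.List.pyRange_one_eq_nil (by rw [hsteps]; omega), List.flatMap_nil]
    rw [this]
  · simp only [h, if_neg, not_false_iff]
    congr 1
    rw [pvB_eq _ _ _ rfl _ 0 (by omega)]
    rw [show (273 : Int) * 0 = 0 from by ring, ← hsteps, pvH_peel]
    rw [hsteps]; omega
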